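-- pv_equiv track=rewrite | github.com/janhavitupe/Job_scam_help | backend/app/utils/domain_utils.py | is_typosquatted
-- ===== SOURCE A (Python) =====
-- def levenshtein(a, b):
--     if len(a) < len(b):
--         return levenshtein(b, a)
--
--     if len(b) == 0:
--         return len(a)
--
--     previous_row = range(len(b) + 1)
--
--     for i, c1 in enumerate(a):
--         current_row = [i + 1]
--         for j, c2 in enumerate(b):
--             insertions = previous_row[j + 1] + 1
--             deletions = current_row[j] + 1
--             substitutions = previous_row[j] + (c1 != c2)
--             current_row.append(min(insertions, deletions, substitutions))
--
--         previous_row = current_row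
--
--     return previous_row[-1]
--
-- KNOWN_DOMAINS = ["amazon.com", "google.com", "microsoft.com"]
--
-- def is_typosquatted(domain):
--     if not domain:
--         return False, None
--
--     for legit in KNOWN_DOMAINS:
--         dist = levenshtein(domain, legit)
--         if dist <= 2 and domain != legit:
--             return True, legit
--
--     return False, None
-- ===== SOURCE B (Python) =====
-- KNOWN_DOMAINS = ["amazon.com", "google.com", "microsoft.com"]
--
--
-- def _leq(a, b, k):
--     # Is the edit distance between a and b at most k?  Works from the end:
--     # strip the common suffix, then try the three edits on the last characters.
--     while a and b and a[-1] == b[-1]: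
--         a = a[:-1]
--         b = b[:-1]
--     if not a:
--         return len(b) <= k
--     if not b:
--         return len(a) <= k
--     if k == 0:
--         return False
--     return _leq(a[:-1], b, k - 1) or _leq(a, b[:-1], k - 1) or _leq(a[:-1], b[:-1], k - 1)
--
--
-- def _close(a, b):
--     # edit distance <= 2?  A length gap above 2 already rules it out.
--     if abs(len(a) - len(b)) > 2:
--         return False
--     return _leq(a, b, 2)
--
--
-- def is_typosquatted(domain):
--     if not domain:
--         return False, None
--     for legit in KNOWN_DOMAINS:
--         if domain != legit and _close(domain, legit):
--             return True, legit
--     return False, None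
-- ===== Notes on version B (the rewrite author's own statement) =====
-- stated objective: faster
-- what changed: Replaces the full Levenshtein DP table with a direct bounded check of whether the edit distance is at most 2 (length-gap early exit, common-suffix stripping, then at most two levels of single-edit recursion), so no distance matrix is ever built.
import Mathlib
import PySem

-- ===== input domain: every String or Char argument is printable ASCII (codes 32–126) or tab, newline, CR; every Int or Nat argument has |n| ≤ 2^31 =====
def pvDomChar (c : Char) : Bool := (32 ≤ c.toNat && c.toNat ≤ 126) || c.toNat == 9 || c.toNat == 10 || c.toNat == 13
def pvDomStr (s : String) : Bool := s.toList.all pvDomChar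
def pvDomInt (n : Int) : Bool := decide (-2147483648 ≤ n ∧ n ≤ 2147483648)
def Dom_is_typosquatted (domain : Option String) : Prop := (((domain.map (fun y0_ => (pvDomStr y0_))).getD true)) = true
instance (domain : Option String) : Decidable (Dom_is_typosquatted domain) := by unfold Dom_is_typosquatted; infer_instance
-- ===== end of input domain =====

-- B checks "edit distance ≤ 2" directly (common-suffix stripping + the three edits,
-- with a length-gap early exit) instead of A's full DP table; same return values.

-- ===== PORT A =====
-- levenshtein(a, b): the swap recursion is unrolled once (after the swap len(b) ≤ len(a),
-- so the recursive call goes straight to the DP core).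
def levA_core (a b : List Char) : Int :=
  if b.length = 0 then (a.length : Int)
  else
    let final :=
      (PySem.List.enumerate a 0).foldl
        (fun prev ic =>
          (PySem.List.enumerate b 0).foldl
            (fun cur jc =>
              let insertions := PySem.List.pyGetD prev (jc.1 + 1) 0 + 1
              let deletions := PySem.List.pyGetD cur jc.1 0 + 1
              let substitutions := PySem.List.pyGetD prev jc.1 0 + (if ic.2 ≠ jc.2 then (1:Int) else 0)
              cur ++ [min (min insertions deletions) substitutions])
            [ic.1 + 1])
        (PySem.List.pyRange 0 ((b.length : Int) + 1) 1)
    PySem.List.pyGetD final (-1) 0            -- previous_row[-1]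

def levenshteinA (a b : List Char) : Int :=
  if a.length < b.length then levA_core b a else levA_core a b

def KNOWN_DOMAINS_A : List String := ["amazon.com", "google.com", "microsoft.com"]

-- the for-loop with early return
def scanA (domain : String) : List String → Bool × Option String
  | [] => (false, none)
  | legit :: rest =>
    let dist := levenshteinA domain.toList legit.toList
    if dist ≤ 2 ∧ domain ≠ legit then (true, some legit) else scanA domain rest

def is_typosquatted (domain : Option String) : Bool × Option String :=
  match domain with
  | none => (false, none)                       -- `not domain`: None …
  | some s => if s = "" then (false, none)      -- … or the empty string
              else scanA s KNOWN_DOMAINS_A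

-- ===== PORT B =====
-- _leq(a, b, k) works on the LAST characters (a[-1], a[:-1]); the port carries the two
-- lists reversed, so a[-1] is the head and a[:-1] the tail — exact.
def leqK : Nat → List Char → List Char → Bool
  | k, x :: xs, y :: ys =>
    if x = y then leqK k xs ys                                  -- the common-suffix strip loop
    else if k = 0 then false
    else leqK (k-1) xs (y::ys) || leqK (k-1) (x::xs) ys || leqK (k-1) xs ys
  | k, [], ys => decide (ys.length ≤ k)
  | k, xs, [] => decide (xs.length ≤ k)
termination_by k xs ys => xs.length + ys.length
decreasing_by all_goals (simp; try omega)

def closeB (a b : List Char) : Bool :=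
  if 2 < ((a.length : Int) - (b.length : Int)).natAbs then false   -- abs(len(a)-len(b)) > 2
  else leqK 2 a.reverse b.reverse

def KNOWN_DOMAINS_B : List String := ["amazon.com", "google.com", "microsoft.com"]

def scanB (domain : String) : List String → Bool × Option String
  | [] => (false, none)
  | legit :: rest =>
    if domain ≠ legit ∧ closeB domain.toList legit.toList = true then (true, some legit)
    else scanB domain rest

def is_typosquatted_alt (domain : Option String) : Bool × Option String :=
  match domain with
  | none => (false, none)
  | some s => if s = "" then (false, none)
              else scanB s KNOWN_DOMAINS_B

-- ===== PRECONDITION & SPEC =====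
def Spec_is_typosquatted (domain : Option String) (out : Bool × Option String) : Prop := out = is_typosquatted_alt domain
instance (domain : Option String) (out : Bool × Option String) : Decidable (Spec_is_typosquatted domain out) := by unfold Spec_is_typosquatted; infer_instance

-- ===== CLAIM (what is proved, stated in full; the proofs are below) =====
def Claim_equal_is_typosquatted : Prop := ∀ (domain : Option String), Dom_is_typosquatted domain → Spec_is_typosquatted domain (is_typosquatted domain)

-- ===== LEMMAS AND PROOFS =====

-- Reference edit distance, consuming both lists from the head (the ports feed it reversed lists).
def levSpec : List Char → List Char → Nat
  | [], ys => ys.length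
  | x :: xs, [] => (x :: xs).length
  | x :: xs, y :: ys =>
    if x = y then levSpec xs ys
    else 1 + min (levSpec xs (y::ys)) (min (levSpec (x::xs) ys) (levSpec xs ys))
termination_by xs ys => xs.length + ys.length
decreasing_by all_goals (simp; try omega)

@[simp] theorem levSpec_nil (ys : List Char) : levSpec [] ys = ys.length := by
  simp [levSpec]

@[simp] theorem levSpec_nil_right (xs : List Char) : levSpec xs [] = xs.length := by
  cases xs <;> simp [levSpec]

theorem levSpec_cons (x y : Char) (xs ys : List Char) :
    levSpec (x :: xs) (y :: ys) =
      if x = y then levSpec xs ys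
      else 1 + min (levSpec xs (y::ys)) (min (levSpec (x::xs) ys) (levSpec xs ys)) := by
  simp [levSpec]

theorem levSpec_len : ∀ (n : Nat) (p q : List Char), p.length + q.length ≤ n →
    q.length ≤ levSpec p q + p.length ∧ p.length ≤ levSpec p q + q.length := by
  intro n
  induction n with
  | zero =>
    intro p q h
    have hp : p = [] := by cases p <;> simp_all
    have hq : q = [] := by cases q <;> simp_all
    simp [hp, hq]
  | succ n ih =>
    intro p q h
    match p, q with
    | [], q => simp
    | x :: p, [] => simp
    | x :: p, y :: q =>
      rw [levSpec_cons]
      simp only [List.length_cons] at h ⊢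
      have h1 := ih p q (by omega)
      have h2 := ih p (y :: q) (by (try simp) <;> omega)
      have h3 := ih (x :: p) q (by (try simp) <;> omega)
      simp only [List.length_cons] at h1 h2 h3
      split_ifs <;> omega

theorem levSpec_lipschitz : ∀ (n : Nat) (p q : List Char), p.length + q.length ≤ n →
    (∀ x, levSpec p q ≤ levSpec (x :: p) q + 1) ∧ (∀ x, levSpec (x :: p) q ≤ levSpec p q + 1) ∧
    (∀ y, levSpec p q ≤ levSpec p (y :: q) + 1) ∧ (∀ y, levSpec p (y :: q) ≤ levSpec p q + 1) := by
  intro n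
  induction n with
  | zero =>
    intro p q h
    have hp : p = [] := by cases p <;> simp_all
    have hq : q = [] := by cases q <;> simp_all
    subst hp; subst hq
    refine ⟨fun x => ?_, fun x => ?_, fun y => ?_, fun y => ?_⟩ <;> simp [levSpec]
  | succ n ih =>
    intro p q h
    match p, q with
    | [], [] =>
      refine ⟨fun x => ?_, fun x => ?_, fun y => ?_, fun y => ?_⟩ <;> simp [levSpec]
    | [], y' :: q' =>
      refine ⟨fun x => ?_, fun x => ?_, fun y => ?_, fun y => ?_⟩
      · have := (levSpec_len ((y'::q').length + 1) [x] (y' :: q') (by (try simp) <;> omega)).1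
        simp at this ⊢; omega
      · rw [levSpec_cons]; split_ifs <;> (try simp) <;> omega
      · simp
      · simp
    | x' :: p', [] =>
      refine ⟨fun x => ?_, fun x => ?_, fun y => ?_, fun y => ?_⟩
      · simp
      · simp
      · have := (levSpec_len ((x'::p').length + 1) (x' :: p') [y] (by (try simp) <;> omega)).2
        simp at this ⊢; omega
      · rw [levSpec_cons]; split_ifs <;> (try simp) <;> omega
    | x' :: p', y' :: q' =>
      simp only [List.length_cons] at h
      have ih1 := ih (x' :: p') q' (by (try simp) <;> omega)
      have ih2 := ih p' (y' :: q') (by (try simp) <;> omega)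
      have ih3 := ih p' q' (by (try simp) <;> omega)
      refine ⟨fun x => ?_, fun x => ?_, fun y => ?_, fun y => ?_⟩
      · -- levSpec P Q ≤ levSpec (x::P) Q + 1
        rw [levSpec_cons x y' (x' :: p') q']
        have F1 := ih1.2.2.2 y'
        have F2 := ih1.1 x
        split_ifs <;> omega
      · -- levSpec (x::P) Q ≤ levSpec P Q + 1
        rw [levSpec_cons x y' (x' :: p') q']
        have F1 := ih1.2.2.1 y'
        split_ifs <;> omega
      · -- levSpec P Q ≤ levSpec P (y::Q) + 1
        rw [levSpec_cons x' y p' (y' :: q')]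
        have F3 := ih2.2.1 x'
        have F4 := ih2.2.2.1 y
        split_ifs <;> omega
      · -- levSpec P (y::Q) ≤ levSpec P Q + 1
        rw [levSpec_cons x' y p' (y' :: q')]
        have F5 := ih2.1 x'
        split_ifs <;> omega

theorem levSpec_symm : ∀ (n : Nat) (p q : List Char), p.length + q.length ≤ n →
    levSpec p q = levSpec q p := by
  intro n
  induction n with
  | zero =>
    intro p q h
    have hp : p = [] := by cases p <;> simp_all
    have hq : q = [] := by cases q <;> simp_all
    simp [hp, hq]
  | succ n ih =>
    intro p q h
    match p, q with
    | [], q => simp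
    | x :: p, [] => simp
    | x :: p, y :: q =>
      rw [levSpec_cons, levSpec_cons]
      simp only [List.length_cons] at h
      have h1 := ih p q (by omega)
      have h2 := ih p (y :: q) (by (try simp) <;> omega)
      have h3 := ih (x :: p) q (by (try simp) <;> omega)
      rw [← h1, ← h2, ← h3]
      split_ifs with hxy hyx
      · rfl
      · exact absurd hxy.symm hyx
      · exact absurd ‹y = x›.symm hxy
      · omega

theorem leqK_eq : ∀ (n : Nat) (k : Nat) (p q : List Char), p.length + q.length ≤ n →
    leqK k p q = decide (levSpec p q ≤ k) := by
  intro n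
  induction n with
  | zero =>
    intro k p q h
    have hp : p = [] := by cases p <;> simp_all
    subst hp
    simp [leqK]
  | succ n ih =>
    intro k p q h
    match p, q with
    | [], q => simp [leqK]
    | x :: p, [] => simp [leqK]
    | x :: p, y :: q =>
      rw [levSpec_cons]
      simp only [List.length_cons] at h
      by_cases hxy : x = y
      · rw [leqK, if_pos hxy, if_pos hxy]
        exact ih k p q (by omega)
      · rw [leqK, if_neg hxy, if_neg hxy]
        cases k with
        | zero =>
          have hno : ¬ (1 + min (levSpec p (y :: q)) (min (levSpec (x :: p) q) (levSpec p q)) ≤ 0) := by omega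
          simp [hno]
        | succ k' =>
          rw [if_neg (Nat.succ_ne_zero k')]
          simp only [Nat.add_sub_cancel]
          rw [ih k' p (y :: q) (by (try simp) <;> omega), ih k' (x :: p) q (by (try simp) <;> omega),
              ih k' p q (by omega)]
          rw [← Bool.decide_or, ← Bool.decide_or, decide_eq_decide]
          omega

-- the row of DP values for the (reversed) processed prefix p of a, over all prefixes of b
def rowR (bl p : List Char) : List Int :=
  (List.range (bl.length + 1)).map (fun j => (levSpec p ((bl.take j).reverse) : Int))

theorem inner_go (bl : List Char) (c1 : Char) (p : List Char) :
    ∀ (t : List Char) (j0 : Nat), j0 + t.length = bl.length → bl.drop j0 = t →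
    (PySem.List.enumerate t (j0 : Int)).foldl
        (fun cur jc =>
          let insertions := PySem.List.pyGetD (rowR bl p) (jc.1 + 1) 0 + 1
          let deletions := PySem.List.pyGetD cur jc.1 0 + 1
          let substitutions := PySem.List.pyGetD (rowR bl p) jc.1 0 + (if c1 ≠ jc.2 then (1:Int) else 0)
          cur ++ [min (min insertions deletions) substitutions])
        ((List.range (j0 + 1)).map (fun j => (levSpec (c1 :: p) ((bl.take j).reverse) : Int)))
    = rowR bl (c1 :: p) := by
  intro t
  induction t with
  | nil =>
    intro j0 h1 h2
    simp only [PySem.List.enumerate_nil, List.foldl_nil]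
    have hj : j0 = bl.length := by simpa using h1
    simp [rowR, hj]
  | cons c2 t' ih =>
    intro j0 h1 h2
    have hj : j0 < bl.length := by simp at h1; omega
    have hdrop := List.drop_eq_getElem_cons hj
    rw [h2] at hdrop
    injection hdrop with hc ht
    rw [PySem.List.enumerate_cons, List.foldl_cons]
    simp only []
    have hcell :
        ((List.range (j0 + 1)).map (fun j => (levSpec (c1 :: p) ((bl.take j).reverse) : Int))) ++
          [min (min (PySem.List.pyGetD (rowR bl p) ((j0 : Int) + 1) 0 + 1)
                 (PySem.List.pyGetD
                   ((List.range (j0 + 1)).map (fun j => (levSpec (c1 :: p) ((bl.take j).reverse) : Int)))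
                   (j0 : Int) 0 + 1))
               (PySem.List.pyGetD (rowR bl p) (j0 : Int) 0 + (if c1 ≠ c2 then (1:Int) else 0))]
        = (List.range (j0 + 1 + 1)).map (fun j => (levSpec (c1 :: p) ((bl.take j).reverse) : Int)) := by
      have e1 : ((j0 : Int) + 1) = ((j0 + 1 : Nat) : Int) := by push_cast; ring
      have hprev1 : PySem.List.pyGetD (rowR bl p) ((j0 : Int) + 1) 0
          = (levSpec p ((bl.take (j0 + 1)).reverse) : Int) := by
        rw [e1, PySem.List.pyGetD_natCast, rowR, PySem.List.getD_map_range _ _ _ _ (by omega)]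
      have hprev0 : PySem.List.pyGetD (rowR bl p) ((j0 : Int)) 0
          = (levSpec p ((bl.take j0).reverse) : Int) := by
        rw [PySem.List.pyGetD_natCast, rowR, PySem.List.getD_map_range _ _ _ _ (by omega)]
      have hcur0 : PySem.List.pyGetD
          ((List.range (j0 + 1)).map (fun j => (levSpec (c1 :: p) ((bl.take j).reverse) : Int)))
          ((j0 : Int)) 0 = (levSpec (c1 :: p) ((bl.take j0).reverse) : Int) := by
        rw [PySem.List.pyGetD_natCast, PySem.List.getD_map_range _ _ _ _ (by omega)]
      rw [hprev1, hprev0, hcur0]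
      rw [List.range_succ (n := j0 + 1), List.map_append]
      congr 1
      simp only [List.map_singleton]
      -- the new cell equals the DP value for the next prefix of b
      have htake : bl.take (j0 + 1) = bl.take j0 ++ [c2] := by
        rw [List.take_add_one, List.getElem?_eq_getElem hj, ← hc]; rfl
      rw [htake, List.reverse_append]
      simp only [List.reverse_cons, List.reverse_nil, List.nil_append, List.singleton_append]
      rw [levSpec_cons]
      have hl := levSpec_lipschitz (p.length + ((bl.take j0).reverse).length + 1) p
        ((bl.take j0).reverse) (by omega)
      have hc1 := hl.1 c1
      have hc2 := hl.2.2.1 c2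
      by_cases hxy : c1 = c2
      · rw [if_pos hxy, if_neg (by simp [hxy])]
        congr 1
        omega
      · rw [if_neg hxy, if_pos (by simp [hxy])]
        congr 1
        push_cast
        omega
    rw [hcell]
    have e2 : ((j0 : Int) + 1) = ((j0 + 1 : Nat) : Int) := by push_cast; ring
    rw [e2]
    exact ih (j0 + 1) (by simp at h1 ⊢; omega) (by rw [ht])

theorem outer_go (bl : List Char) : ∀ (a' p : List Char),
    (PySem.List.enumerate a' (p.length : Int)).foldl
      (fun prev ic =>
        (PySem.List.enumerate bl 0).foldl
          (fun cur jc =>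
            let insertions := PySem.List.pyGetD prev (jc.1 + 1) 0 + 1
            let deletions := PySem.List.pyGetD cur jc.1 0 + 1
            let substitutions := PySem.List.pyGetD prev jc.1 0 + (if ic.2 ≠ jc.2 then (1:Int) else 0)
            cur ++ [min (min insertions deletions) substitutions])
          [ic.1 + 1])
      (rowR bl p)
    = rowR bl (a'.reverse ++ p) := by
  intro a'
  induction a' with
  | nil => intro p; simp [PySem.List.enumerate_nil]
  | cons c1 a'' ih =>
    intro p
    rw [PySem.List.enumerate_cons, List.foldl_cons]
    have hinit : [((p.length : Int) + 1)]
        = (List.range (0 + 1)).map (fun j => (levSpec (c1 :: p) ((bl.take j).reverse) : Int)) := by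
      simp
    have hinner := inner_go bl c1 p bl 0 (by simp) (by simp)
    simp only [Nat.cast_zero] at hinner
    have hstep :
        (PySem.List.enumerate bl 0).foldl
          (fun cur jc =>
            let insertions := PySem.List.pyGetD (rowR bl p) (jc.1 + 1) 0 + 1
            let deletions := PySem.List.pyGetD cur jc.1 0 + 1
            let substitutions := PySem.List.pyGetD (rowR bl p) jc.1 0 + (if c1 ≠ jc.2 then (1:Int) else 0)
            cur ++ [min (min insertions deletions) substitutions])
          [((p.length : Int) + 1)]
        = rowR bl (c1 :: p) := by
      rw [hinit]
      exact hinner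
    rw [hstep]
    have e1 : ((p.length : Int) + 1) = (((c1 :: p).length : Nat) : Int) := by simp
    rw [e1]
    have := ih (c1 :: p)
    rw [this]
    simp

theorem levA_core_eq (a b : List Char) : levA_core a b = (levSpec a.reverse b.reverse : Int) := by
  unfold levA_core
  by_cases hb : b.length = 0
  · have hb' : b = [] := List.length_eq_zero_iff.mp hb
    subst hb'
    simp
  · rw [if_neg hb]
    simp only []
    have hrow0 : PySem.List.pyRange 0 ((b.length : Int) + 1) 1 = rowR b [] := by
      rw [PySem.List.pyRange_one]
      unfold rowR
      have hn : (((b.length : Int) + 1) - 0).toNat = b.length + 1 := by omega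
      rw [hn]
      apply List.map_congr_left
      intro j hj
      simp only [List.mem_range] at hj
      simp only [levSpec_nil, List.length_reverse, List.length_take]
      omega
    have houter := outer_go b a []
    simp only [List.length_nil, Nat.cast_zero, List.append_nil] at houter
    rw [hrow0, houter]
    have hne : rowR b a.reverse ≠ [] := by unfold rowR; simp
    rw [PySem.List.pyGetD_neg_one _ _ hne]
    unfold rowR
    rw [List.getLast_eq_getElem]
    simp [List.getElem_range]

theorem levenshteinA_eq (a b : List Char) : levenshteinA a b = (levSpec a.reverse b.reverse : Int) := by
  unfold levenshteinA
  split_ifs with h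
  · rw [levA_core_eq]
    norm_cast
    exact levSpec_symm (b.reverse.length + a.reverse.length) b.reverse a.reverse le_rfl
  · exact levA_core_eq a b

theorem closeB_eq (a b : List Char) : closeB a b = decide (levSpec a.reverse b.reverse ≤ 2) := by
  unfold closeB
  split_ifs with h
  · have hlen := levSpec_len (a.reverse.length + b.reverse.length) a.reverse b.reverse le_rfl
    simp only [List.length_reverse] at hlen
    have hno : ¬ (levSpec a.reverse b.reverse ≤ 2) := by omega
    simp [hno]
  · exact leqK_eq (a.reverse.length + b.reverse.length) 2 a.reverse b.reverse le_rfl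

theorem scan_eq (s : String) (l : List String) : scanA s l = scanB s l := by
  induction l with
  | nil => rfl
  | cons legit rest ih =>
    show (if levenshteinA s.toList legit.toList ≤ 2 ∧ s ≠ legit then (true, some legit) else scanA s rest)
       = (if s ≠ legit ∧ closeB s.toList legit.toList = true then (true, some legit) else scanB s rest)
    rw [ih, levenshteinA_eq, closeB_eq]
    by_cases h1 : s = legit <;> by_cases h2 : levSpec s.toList.reverse legit.toList.reverse ≤ 2 <;>
      simp [h1, h2] <;> omega

-- ===== VERDICT (by name: the statement is the Claim_ definition above) =====
theorem is_typosquatted_spec : Claim_equal_is_typosquatted := by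
  intro domain _
  unfold Spec_is_typosquatted
  cases domain with
  | none => rfl
  | some s =>
    show (if s = "" then (false, none) else scanA s KNOWN_DOMAINS_A)
       = (if s = "" then (false, none) else scanB s KNOWN_DOMAINS_B)
    by_cases h : s = "" <;> simp [h, KNOWN_DOMAINS_A, KNOWN_DOMAINS_B, scan_eq]
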